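-- pv_equiv track=rewrite | github.com/algorithm-studying/daily | 2022_01_21/1_python_안서연.py | solution
-- ===== SOURCE A (Python) =====
-- def solution(price, money, count):
--     answer = -1
--
--     total = 0
--     for i in range(1, count+1):
--         total += price * i
--
--     answer = total - money
--     if(answer <= 0):
--         return 0
--
--     return answer
-- ===== SOURCE B (Python) =====
-- def solution(price, money, count):
--     n = count if count > 0 else 0
--     answer = price * n * (n + 1) // 2 - money
--     return answer if answer > 0 else 0
-- ===== Notes on version B (the rewrite author's own statement) =====
-- stated objective: faster
-- what changed: replaces the O(count) accumulation loop by the closed-form arithmetic-series formula price*n*(n+1)//2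
import Mathlib
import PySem

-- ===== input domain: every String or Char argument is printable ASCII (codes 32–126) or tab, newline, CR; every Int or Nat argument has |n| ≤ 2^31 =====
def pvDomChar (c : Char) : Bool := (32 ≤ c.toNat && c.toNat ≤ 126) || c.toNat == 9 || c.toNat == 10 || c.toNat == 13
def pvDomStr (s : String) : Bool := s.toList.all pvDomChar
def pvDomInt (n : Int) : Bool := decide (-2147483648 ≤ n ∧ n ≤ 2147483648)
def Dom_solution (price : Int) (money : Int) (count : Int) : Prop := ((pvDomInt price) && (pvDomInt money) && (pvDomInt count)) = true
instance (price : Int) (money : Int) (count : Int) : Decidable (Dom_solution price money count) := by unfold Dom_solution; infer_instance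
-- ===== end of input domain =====

-- B replaces A's O(count) accumulation loop by the closed-form arithmetic-series formula (faster, asymptotic).


-- ===== PORT A =====
-- 'for i in range(1, count+1): total += price * i' as a counting loop: i runs 1,2,…,count;
-- the remaining iteration count (count+1-1).toNat = the length of range(1, count+1) is the fuel
def solutionGo (price : Int) (i : Int) (fuel : Nat) (total : Int) : Int :=
  match fuel with
  | 0 => total
  | f + 1 => solutionGo price (i + 1) f (total + price * i)

def solution (price : Int) (money : Int) (count : Int) : Int :=
  let total := solutionGo price 1 (count + 1 - 1).toNat 0
  let answer := total - money
  if answer ≤ 0 then 0 else answer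

-- ===== PORT B =====
def solution_alt (price : Int) (money : Int) (count : Int) : Int :=
  let n := if count > 0 then count else 0
  let answer := PySem.Int.floordiv (price * n * (n + 1)) 2 - money
  if answer > 0 then answer else 0

-- ===== PRECONDITION & SPEC =====
def Spec_solution (price : Int) (money : Int) (count : Int) (out : Int) : Prop := out = solution_alt price money count
instance (price : Int) (money : Int) (count : Int) (out : Int) : Decidable (Spec_solution price money count out) := by unfold Spec_solution; infer_instance

-- ===== CLAIM (what is proved, stated in full; the proofs are below) =====
def Claim_equal_solution : Prop := ∀ (price : Int) (money : Int) (count : Int), Dom_solution price money count → Spec_solution price money count (solution price money count)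

-- ===== LEMMAS AND PROOFS =====

theorem go_eq_foldl (price : Int) (n : Nat) : ∀ (i t : Int),
    solutionGo price i n t = (PySem.List.pyRange i (i + (n : Int)) 1).foldl (fun total j => total + price * j) t := by
  induction n with
  | zero =>
    intro i t
    rw [solutionGo, PySem.List.pyRange_one_eq_nil (by omega), List.foldl_nil]
  | succ m ih =>
    intro i t
    have hcons : PySem.List.pyRange i (i + ((m : Nat) + 1 : Nat)) 1
        = i :: PySem.List.pyRange (i + 1) (i + 1 + (m : Int)) 1 := by
      have h1 : PySem.List.pyRange i (i + ((m : Nat) + 1 : Nat)) 1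
          = i :: PySem.List.pyRange (i + 1) (i + ((m : Nat) + 1 : Nat)) 1 :=
        PySem.List.pyRange_one_cons (by push_cast; omega)
      rw [h1]
      congr 1
      push_cast
      ring_nf
    rw [solutionGo, hcons, List.foldl_cons, ih (i + 1)]

theorem sum_range_closed (price : Int) (n : Nat) :
    (PySem.List.pyRange 1 ((n : Int) + 1) 1).foldl (fun total i => total + price * i) 0
      = price * (n : Int) * ((n : Int) + 1) / 2 := by
  induction n with
  | zero => simp [PySem.List.pyRange_one_eq_nil]
  | succ m ih =>
    have hsplit : PySem.List.pyRange 1 ((m : Int) + 1 + 1) 1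
        = PySem.List.pyRange 1 ((m : Int) + 1) 1 ++ [(m : Int) + 1] :=
      PySem.List.pyRange_one_succ_right (by omega)
    push_cast
    rw [hsplit, List.foldl_append, ih]
    obtain ⟨k, hk⟩ : (2 : Int) ∣ (m : Int) * ((m : Int) + 1) := Int.even_mul_succ_self m |>.two_dvd
    have h1 : price * (m : Int) * ((m : Int) + 1) / 2 = price * k := by
      have : price * (m : Int) * ((m : Int) + 1) = price * k * 2 := by linear_combination price * hk
      rw [this]; exact Int.mul_ediv_cancel _ (by norm_num)
    have h2 : price * ((m : Int) + 1) * ((m : Int) + 1 + 1) / 2 = price * (k + ((m : Int) + 1)) := by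
      have : price * ((m : Int) + 1) * ((m : Int) + 1 + 1) = price * (k + ((m : Int) + 1)) * 2 := by
        linear_combination price * hk
      rw [this]; exact Int.mul_ediv_cancel _ (by norm_num)
    rw [h1, h2]
    simp only [List.foldl_cons, List.foldl_nil]
    ring

-- ===== VERDICT (by name: the statement is the Claim_ definition above) =====
theorem solution_spec : Claim_equal_solution := by
  intro price money count _
  unfold Spec_solution
  simp only [solution, solution_alt]
  rw [go_eq_foldl price (count + 1 - 1).toNat 1 0]
  rw [PySem.Int.floordiv_eq_ediv_of_pos (by norm_num : (0:Int) < 2)]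
  by_cases h : count > 0
  · have hb : (1 : Int) + ((count + 1 - 1).toNat : Int) = ((count.toNat : Int) + 1) := by omega
    rw [if_pos h, hb, sum_range_closed price count.toNat]
    have hn : ((count.toNat : Nat) : Int) = count := by omega
    rw [hn]
    split_ifs <;> omega
  · rw [if_neg h, PySem.List.pyRange_one_eq_nil (by omega)]
    simp only [List.foldl_nil, mul_zero, zero_add, mul_one]
    split_ifs <;> omega
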